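-- pv_equiv track=rewrite | github.com/ig-rudenko/find_description | find_desc/finder.py | vlan_range
-- ===== SOURCE A (Python) =====
-- def vlan_range(vlans_ranges: list) -> set:
--     """
--     Преобразовывает сокращенные диапазоны VLAN'ов в развернутый список
--
--     14, 100-103, 142 -> 14, 100, 101, 102, 103, 142
--
--     :param vlans_ranges: Список диапазонов
--     :return: развернутое множество VLAN'ов
--     """
--     vlans = []
--     for v_range in vlans_ranges:
--         if len(v_range.split()) > 1:
--             vlans += list(vlan_range(v_range.split()))
--         try:
--             if '-' in v_range:
--                 parts = v_range.split('-')
--                 vlans += range(int(parts[0]), int(parts[1]) + 1)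
--             else:
--                 vlans.append(int(v_range))
--         except ValueError:
--             pass
--
--     return set(vlans)
-- ===== SOURCE B (Python) =====
-- def _collect(s, out):
--     """Add the VLANs encoded by one string s into the set out (ignore unparsable)."""
--     try:
--         if '-' in s:
--             parts = s.split('-')
--             out.update(range(int(parts[0]), int(parts[1]) + 1))
--         else:
--             out.add(int(s))
--     except ValueError:
--         pass
--
--
-- def vlan_range(vlans_ranges: list) -> set:
--     """Iterative expansion of VLAN range strings into a set of ints (no recursion)."""
--     vlans = set()
--     for v_range in vlans_ranges:
--         tokens = v_range.split()
--         if len(tokens) > 1: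
--             for token in tokens:
--                 _collect(token, vlans)
--         _collect(v_range, vlans)
--     return vlans
-- ===== Notes on version B (the rewrite author's own statement) =====
-- stated objective: simpler
-- what changed: Replaces A's recursion on v_range.split() and list-then-set construction by a single flat loop that accumulates directly into a set, using one shared per-string parsing helper for both whole strings and their whitespace-split tokens.
import Mathlib
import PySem

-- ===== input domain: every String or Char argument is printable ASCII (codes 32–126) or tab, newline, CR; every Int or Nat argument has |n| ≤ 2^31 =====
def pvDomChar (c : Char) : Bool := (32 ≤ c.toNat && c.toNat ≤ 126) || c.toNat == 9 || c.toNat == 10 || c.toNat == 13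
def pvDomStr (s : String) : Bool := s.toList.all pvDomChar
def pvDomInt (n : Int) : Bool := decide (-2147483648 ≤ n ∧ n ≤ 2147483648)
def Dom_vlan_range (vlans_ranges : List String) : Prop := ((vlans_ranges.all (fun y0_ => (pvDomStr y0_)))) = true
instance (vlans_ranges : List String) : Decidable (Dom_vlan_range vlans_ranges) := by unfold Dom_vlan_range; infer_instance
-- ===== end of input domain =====

-- B replaces A's recursion (recursing on v.split() for multi-token strings) by a flat
-- iteration with a shared per-token helper accumulating directly into a set (objective: simpler).

-- ===== PORT A =====

-- the try-block of A: the ints contributed by one string (ValueError → nothing).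
-- The `| _, _ => []` arm for parts[0]/parts[1] is unreachable: '-' in v gives ≥ 2 parts.
def vlanTry (v : String) : List Int :=
  if PySem.Str.isIn "-" v then
    match PySem.Str.split? v "-" with
    | none => []          -- unreachable: "-" ≠ ""
    | some parts =>
      match PySem.List.pyGet? parts 0, PySem.List.pyGet? parts 1 with
      | some p0, some p1 =>
        match PySem.Int.ofStr? p0, PySem.Int.ofStr? p1 with
        | some a, some b => PySem.List.pyRange a (b + 1) 1
        | _, _ => []      -- ValueError: pass
      | _, _ => []        -- unreachable (would be an uncaught IndexError)
  else
    match PySem.Int.ofStr? v with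
    | some n => [n]
    | none => []          -- ValueError: pass

-- total number of whitespace characters in the list (termination measure for A's recursion)
def wsCount (l : List String) : Nat :=
  (l.map (fun s => s.toList.countP PySem.Chars.isspace)).sum

-- tokens of split₀ are nonempty and whitespace-free (invariant of Chars.split₀.go)
theorem split₀_go_tokens (s cur : List Char) (acc : List (List Char))
    (hcur : ∀ c ∈ cur, PySem.Chars.isspace c = false)
    (hacc : ∀ t ∈ acc, t ≠ [] ∧ ∀ c ∈ t, PySem.Chars.isspace c = false) :
    ∀ t ∈ PySem.Chars.split₀.go s cur acc, t ≠ [] ∧ ∀ c ∈ t, PySem.Chars.isspace c = false := by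
  induction s generalizing cur acc with
  | nil =>
    intro t ht
    simp only [PySem.Chars.split₀.go] at ht
    split at ht
    · exact hacc t (by simpa using ht)
    · rcases (by simpa using ht) with h | h
      · exact hacc t h
      · subst h
        have hne : cur ≠ [] := by simpa [List.isEmpty_iff] using ‹¬cur.isEmpty = true›
        refine ⟨by simpa using hne, ?_⟩
        intro c hc; exact hcur c (by simpa using hc)
  | cons a s ih =>
    intro t ht
    simp only [PySem.Chars.split₀.go] at ht
    split at ht
    · split at ht
      · exact ih [] acc (by simp) hacc t ht
      · refine ih [] (cur.reverse :: acc) (by simp) ?_ t ht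
        intro u hu
        rcases List.mem_cons.mp hu with h | h
        · subst h
          have hne : cur ≠ [] := by simpa [List.isEmpty_iff] using ‹¬cur.isEmpty = true›
          refine ⟨by simpa using hne, ?_⟩
          intro c hc; exact hcur c (by simpa using hc)
        · exact hacc u h
    · refine ih (a :: cur) acc ?_ hacc t ht
      intro c hc
      rcases List.mem_cons.mp hc with h | h
      · subst h; exact Bool.eq_false_iff.mpr ‹_›
      · exact hcur c h

theorem split₀_tokens (s : List Char) :
    ∀ t ∈ PySem.Chars.split₀ s, t ≠ [] ∧ ∀ c ∈ t, PySem.Chars.isspace c = false :=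
  split₀_go_tokens s [] [] (by simp) (by simp)

-- split₀ of a nonempty whitespace-free string is the singleton
theorem split₀_go_nonspace (s cur : List Char) (acc : List (List Char))
    (hs : ∀ c ∈ s, PySem.Chars.isspace c = false) :
    PySem.Chars.split₀.go s cur acc =
      if s.reverse ++ cur = [] then acc.reverse else ((s.reverse ++ cur).reverse :: acc).reverse := by
  induction s generalizing cur with
  | nil =>
    simp only [PySem.Chars.split₀.go, List.reverse_nil, List.nil_append]
    rcases cur.eq_nil_or_concat with h | ⟨_, _, h⟩ <;> subst h <;> simp
  | cons a s ih =>
    have ha : PySem.Chars.isspace a = false := hs a (by simp)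
    simp only [PySem.Chars.split₀.go, ha]
    rw [if_neg (by simp), ih (a :: cur) (fun c hc => hs c (by simp [hc]))]
    simp

theorem split₀_nonspace (s : List Char) (hne : s ≠ [])
    (hs : ∀ c ∈ s, PySem.Chars.isspace c = false) :
    PySem.Chars.split₀ s = [s] := by
  unfold PySem.Chars.split₀
  rw [split₀_go_nonspace s [] [] hs]
  simp [hne]

-- if split₀ has more than one token, the string contains a whitespace character
theorem wsCount_split₀_lt (v : String) (rest : List String)
    (h : (PySem.Str.split₀ v).length > 1) :
    wsCount (PySem.Str.split₀ v) < wsCount (v :: rest) := by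
  have hlen : (PySem.Chars.split₀ v.toList).length > 1 := by
    rw [← PySem.Str.split₀_map_toList, List.length_map]; exact h
  have hz : wsCount (PySem.Str.split₀ v) = 0 := by
    unfold wsCount
    rw [List.sum_eq_zero]
    intro x hx
    rcases List.mem_map.mp hx with ⟨t, ht, rfl⟩
    rw [List.countP_eq_zero]
    intro c hc
    have : t.toList ∈ PySem.Chars.split₀ v.toList := by
      rw [← PySem.Str.split₀_map_toList]; exact List.mem_map_of_mem ht
    simp [(split₀_tokens v.toList t.toList this).2 c hc]
  have hsp : ∃ c ∈ v.toList, PySem.Chars.isspace c = true := by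
    by_contra hno
    push Not at hno
    have hnos : ∀ c ∈ v.toList, PySem.Chars.isspace c = false := by
      intro c hc; exact Bool.eq_false_iff.mpr (hno c hc)
    rcases eq_or_ne v.toList [] with he | he
    · rw [he] at hlen
      simp [PySem.Chars.split₀, PySem.Chars.split₀.go] at hlen
    · rw [split₀_nonspace v.toList he hnos] at hlen
      simp at hlen
  have hpos : 0 < v.toList.countP PySem.Chars.isspace := List.countP_pos_iff.mpr hsp
  rw [hz]
  unfold wsCount
  simp only [List.map_cons, List.sum_cons]
  omega

theorem wsCount_cons_le (v : String) (rest : List String) :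
    wsCount rest ≤ wsCount (v :: rest) := by
  unfold wsCount
  simp only [List.map_cons, List.sum_cons]
  omega


-- the `vlans` list A accumulates, before the final set()
def vlanList : List String → List Int
  | [] => []
  | v :: rest =>
    (if (PySem.Str.split₀ v).length > 1
       then (PySem.Set.ofList (vlanList (PySem.Str.split₀ v)) : List Int)
       else []) ++ vlanTry v ++ vlanList rest
  termination_by l => (wsCount l, l.length)
  decreasing_by
    · exact Prod.Lex.left _ _ (wsCount_split₀_lt v rest ‹_›)
    · rcases Nat.lt_or_ge (wsCount rest) (wsCount (v :: rest)) with h | h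
      · exact Prod.Lex.left _ _ h
      · have : wsCount rest = wsCount (v :: rest) := le_antisymm (wsCount_cons_le v rest) h
        rw [this]; exact Prod.Lex.right _ (Nat.lt_succ_self _)

def vlan_range (vlans_ranges : List String) : List Int :=
  PySem.Set.ofList (vlanList vlans_ranges)

-- ===== PORT B =====

-- Source B's _collect: add the VLANs of one string into the accumulating set
def collect (out : PySem.Set Int) (s : String) : PySem.Set Int :=
  if PySem.Str.isIn "-" s then
    match PySem.Str.split? s "-" with
    | none => out         -- unreachable: "-" ≠ ""
    | some parts =>
      match PySem.List.pyGet? parts 0, PySem.List.pyGet? parts 1 with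
      | some p0, some p1 =>
        match PySem.Int.ofStr? p0, PySem.Int.ofStr? p1 with
        | some a, some b => PySem.Set.update out (PySem.List.pyRange a (b + 1) 1)
        | _, _ => out     -- ValueError: pass
      | _, _ => out       -- unreachable
  else
    match PySem.Int.ofStr? s with
    | some n => PySem.Set.add out n
    | none => out         -- ValueError: pass

def vlan_range_alt (vlans_ranges : List String) : List Int :=
  vlans_ranges.foldl
    (fun out v =>
      let tokens := PySem.Str.split₀ v
      let out := if tokens.length > 1 then tokens.foldl collect out else out
      collect out v)
    PySem.Set.empty

-- ===== PRECONDITION & SPEC =====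
def Spec_vlan_range (vlans_ranges : List String) (out : List Int) : Prop := out = vlan_range_alt vlans_ranges
instance (vlans_ranges : List String) (out : List Int) : Decidable (Spec_vlan_range vlans_ranges out) := by unfold Spec_vlan_range; infer_instance

-- ===== CLAIM (what is proved, stated in full; the proofs are below) =====
def Claim_equal_vlan_range : Prop := ∀ (vlans_ranges : List String), Dom_vlan_range vlans_ranges → Spec_vlan_range vlans_ranges (vlan_range vlans_ranges)

-- ===== LEMMAS AND PROOFS =====







-- collect is exactly "update by vlanTry"
theorem collect_eq_update (out : PySem.Set Int) (s : String) :
    collect out s = PySem.Set.update out (vlanTry s) := by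
  unfold collect vlanTry
  repeat' split
  all_goals simp [PySem.Set.update_eq_foldl]

-- update by an ofList is update by the list itself
theorem update_ofList (s : PySem.Set Int) (x : List Int) :
    PySem.Set.update s (PySem.Set.ofList x) = PySem.Set.update s x := by
  rw [PySem.Set.update_eq_append_filter, PySem.Set.update_eq_append_filter,
    PySem.Set.ofList_ofList]

-- a token of split₀ splits to itself
theorem split₀_token_self (v t : String) (ht : t ∈ PySem.Str.split₀ v) :
    PySem.Str.split₀ t = [t] := by
  have hmem : t.toList ∈ PySem.Chars.split₀ v.toList := by
    rw [← PySem.Str.split₀_map_toList]; exact List.mem_map_of_mem ht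
  obtain ⟨hne, hns⟩ := split₀_tokens v.toList t.toList hmem
  unfold PySem.Str.split₀
  rw [split₀_nonspace t.toList hne hns]
  simp

-- on a list of tokens, vlanList is just the concatenation of the try-blocks
theorem vlanList_tokens (v : String) (l : List String)
    (hl : ∀ t ∈ l, t ∈ PySem.Str.split₀ v) :
    vlanList l = l.flatMap vlanTry := by
  induction l with
  | nil => simp [vlanList]
  | cons t rest ih =>
    rw [vlanList]
    rw [split₀_token_self v t (hl t (by simp))]
    simp only [List.length_cons, List.length_nil]
    rw [if_neg (by omega), ih (fun u hu => hl u (by simp [hu]))]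
    simp

-- folding collect is updating by the flatMap of vlanTry
theorem foldl_collect (l : List String) (s : PySem.Set Int) :
    l.foldl collect s = PySem.Set.update s (l.flatMap vlanTry) := by
  induction l generalizing s with
  | nil => simp [PySem.Set.update_nil]
  | cons t rest ih =>
    rw [List.foldl_cons, ih, List.flatMap_cons, PySem.Set.update_append, collect_eq_update]

-- main loop invariant
theorem foldl_step_eq_update (l : List String) (s : PySem.Set Int) :
    l.foldl
      (fun out v =>
        let tokens := PySem.Str.split₀ v
        let out := if tokens.length > 1 then tokens.foldl collect out else out
        collect out v) s
      = PySem.Set.update s (vlanList l) := by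
  induction l generalizing s with
  | nil => simp [vlanList, PySem.Set.update_nil]
  | cons v rest ih =>
    rw [List.foldl_cons, ih, vlanList]
    rw [PySem.Set.update_append, PySem.Set.update_append]
    congr 1
    rw [collect_eq_update]
    congr 1
    by_cases h : (PySem.Str.split₀ v).length > 1
    · rw [if_pos h, if_pos h, foldl_collect,
        vlanList_tokens v (PySem.Str.split₀ v) (fun t ht => ht), update_ofList]
    · rw [if_neg h, if_neg h, PySem.Set.update_nil]

-- ===== VERDICT (by name: the statement is the Claim_ definition above) =====
theorem vlan_range_spec : Claim_equal_vlan_range := by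
  intro l _
  unfold Spec_vlan_range vlan_range vlan_range_alt
  rw [foldl_step_eq_update, PySem.Set.update_empty]
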